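-- pv_equiv track=rewrite | github.com/asdadfad/world-cup-draw | group_draw.py | is_group_valid2
-- ===== SOURCE A (Python) =====
-- from collections import Counter
--
-- def is_group_valid2(continents):
--     tab = Counter(continents)
--     if tab.get('Eu', 0) > 2:
--         return False
--     for cont, count in tab.items():
--         if cont != 'Eu' and count > 1:
--             return False
--     return True
-- ===== SOURCE B (Python) =====
-- from collections import deque
--
-- def is_group_valid2(continents):
--     # Sort so equal continents are contiguous, then peel off one run at a time
--     # and check each run's length against its bound (2 for 'Eu', 1 otherwise).
--     rest = deque(sorted(continents))
--     while rest:
--         head = rest.popleft()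
--         run = 1
--         while rest and rest[0] == head:
--             rest.popleft()
--             run += 1
--         if run > (2 if head == 'Eu' else 1):
--             return False
--     return True
-- ===== Notes on version B (the rewrite author's own statement) =====
-- stated objective: alternative
-- what changed: Replaces A's hash-table counting (build a Counter, then a second loop over its items) with sort-then-run-length-scan: sort the list so equal continents are contiguous, then recursively peel off each run and reject if a run exceeds its bound (2 for 'Eu', 1 otherwise); no frequency table exists at any point.
import Mathlib
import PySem

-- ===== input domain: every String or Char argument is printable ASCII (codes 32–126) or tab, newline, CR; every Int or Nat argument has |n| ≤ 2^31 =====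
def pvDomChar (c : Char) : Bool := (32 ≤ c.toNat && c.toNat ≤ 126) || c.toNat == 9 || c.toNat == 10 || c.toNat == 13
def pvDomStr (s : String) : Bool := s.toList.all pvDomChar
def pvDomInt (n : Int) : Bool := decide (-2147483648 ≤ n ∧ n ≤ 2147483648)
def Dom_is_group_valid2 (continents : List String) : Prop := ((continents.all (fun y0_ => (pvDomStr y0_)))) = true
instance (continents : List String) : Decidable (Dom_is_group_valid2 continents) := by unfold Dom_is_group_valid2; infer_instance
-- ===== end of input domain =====

-- B replaces A's Counter-then-scan-the-table structure by sort-then-run-length-scan: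
-- sorting makes equal continents contiguous, so each run's length is its count
-- (objective: alternative; not faster).

-- ===== PORT A =====
-- the 'for cont, count in tab.items()' loop
def igvLoopA : List (String × Int) → Bool
  | [] => true
  | (cont, count) :: rest => if cont ≠ "Eu" && count > 1 then false else igvLoopA rest

def is_group_valid2 (continents : List String) : Bool :=
  let tab := PySem.Dict.counter continents
  if tab.getD "Eu" 0 > 2 then false
  else igvLoopA tab.items

-- ===== PORT B =====
-- the 'while rest and rest[0] == head' loop of Source B: peel the run of head off the
-- front, returning (number of extra copies peeled, remainder)
def igvRun (head : String) : List String → Nat × List String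
  | [] => (0, [])
  | d :: rest =>
    if d == head then
      let p := igvRun head rest
      (p.1 + 1, p.2)
    else (0, d :: rest)

lemma igvRun_snd_length_le (head : String) (l : List String) :
    (igvRun head l).2.length ≤ l.length := by
  induction l with
  | nil => simp [igvRun]
  | cons d rest ih =>
    simp only [igvRun]
    split
    · exact Nat.le_succ_of_le ih
    · simp

-- _runs_ok of Source B
def igvRunsOk : List String → Bool
  | [] => true
  | head :: rest =>
    let p := igvRun head rest
    if 1 + p.1 > (if head == "Eu" then 2 else 1) then false
    else igvRunsOk p.2
  termination_by s => s.length
  decreasing_by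
    exact Nat.lt_succ_of_le (igvRun_snd_length_le head rest)

def is_group_valid2_alt (continents : List String) : Bool :=
  igvRunsOk (PySem.List.sorted continents (fun x => x) false)

-- ===== PRECONDITION & SPEC =====
def Spec_is_group_valid2 (continents : List String) (out : Bool) : Prop := out = is_group_valid2_alt continents
instance (continents : List String) (out : Bool) : Decidable (Spec_is_group_valid2 continents out) := by unfold Spec_is_group_valid2; infer_instance

-- ===== CLAIM (what is proved, stated in full; the proofs are below) =====
def Claim_equal_is_group_valid2 : Prop := ∀ (continents : List String), Dom_is_group_valid2 continents → Spec_is_group_valid2 continents (is_group_valid2 continents)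

-- ===== LEMMAS AND PROOFS =====

-- A's table loop succeeds iff no non-Eu entry has count > 1
lemma igvLoopA_true_iff (l : List (String × Int)) :
    igvLoopA l = true ↔ ∀ p ∈ l, p.1 ≠ "Eu" → p.2 ≤ 1 := by
  induction l with
  | nil => simp [igvLoopA]
  | cons p rest ih =>
    obtain ⟨cont, count⟩ := p
    simp only [igvLoopA, List.forall_mem_cons]
    split_ifs with h
    · simp only [Bool.and_eq_true, decide_eq_true_eq, ne_eq] at h
      constructor
      · intro hf; exact absurd hf (by simp)
      · rintro ⟨h1, _⟩
        exact absurd (h1 h.1) (by omega)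
    · simp only [Bool.and_eq_true, decide_eq_true_eq, ne_eq, not_and, not_lt] at h
      rw [ih]
      constructor
      · intro hr; exact ⟨fun hne => h hne, hr⟩
      · rintro ⟨_, hr⟩; exact hr

-- characterisation of A: every continent's count is within its bound
lemma is_group_valid2_true_iff (l : List String) :
    is_group_valid2 l = true ↔
      ∀ c ∈ l, l.count c ≤ (if c = "Eu" then 2 else 1) := by
  change (if (PySem.Dict.counter l).getD "Eu" 0 > 2 then false
          else igvLoopA (PySem.Dict.counter l).items) = true ↔ _
  split_ifs with h
  · simp only [false_iff]
    intro hall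
    rw [PySem.Dict.getD_counter] at h
    have hm : "Eu" ∈ l := by
      rcases Nat.eq_zero_or_pos (l.count "Eu") with h0 | h0
      · rw [h0] at h; norm_num at h
      · exact List.count_pos_iff.mp h0
    have h2 := hall "Eu" hm
    rw [if_pos rfl] at h2
    have h3 : ((l.count "Eu" : Int)) ≤ 2 := by exact_mod_cast h2
    omega
  · rw [PySem.Dict.getD_counter] at h
    push Not at h
    rw [igvLoopA_true_iff, PySem.Dict.items_counter]
    constructor
    · intro hall c hc
      by_cases hce : c = "Eu"
      · subst hce; rw [if_pos rfl]; exact_mod_cast h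
      · have h2 : (l.count c : Int) ≤ 1 := by
          simpa using hall (c, (l.count c : Int))
            (List.mem_map.mpr ⟨c, by simpa [PySem.Set.mem_ofList] using hc, rfl⟩) hce
        rw [if_neg hce]; exact_mod_cast h2
    · rintro hall ⟨c, n⟩ hp hcne
      rcases List.mem_map.mp hp with ⟨k, hk, hkeq⟩
      obtain ⟨rfl, rfl⟩ : k = c ∧ (l.count k : Int) = n :=
        ⟨congrArg Prod.fst hkeq, congrArg Prod.snd hkeq⟩
      have hkm : k ∈ l := by simpa [PySem.Set.mem_ofList] using hk
      have := hall k hkm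
      rw [if_neg hcne] at this
      show ((l.count k : Int)) ≤ 1
      exact_mod_cast this

-- igvRun peels exactly the leading run: it is takeWhile/dropWhile
lemma igvRun_eq (head : String) (l : List String) :
    igvRun head l = ((l.takeWhile (· == head)).length, l.dropWhile (· == head)) := by
  induction l with
  | nil => simp [igvRun]
  | cons d rest ih =>
    by_cases h : (d == head) = true
    · simp [igvRun, h, ih]
    · simp [igvRun, h]

-- in a list whose elements are all ≥ c and sorted, dropping the leading c's
-- leaves no c behind
lemma count_dropWhile_eq_zero (c : String) (l : List String)
    (hle : ∀ x ∈ l, c ≤ x) (hp : l.Pairwise (· ≤ ·)) :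
    (l.dropWhile (· == c)).count c = 0 := by
  induction l with
  | nil => simp
  | cons d rest ih =>
    rw [List.pairwise_cons] at hp
    by_cases h : d = c
    · subst h
      rw [List.dropWhile_cons_of_pos (by simp)]
      exact ih (fun x hx => hle x (List.mem_cons_of_mem _ hx)) hp.2
    · rw [List.dropWhile_cons_of_neg (by simp [h])]
      have hcd : c < d := lt_of_le_of_ne (hle d (by simp)) (fun e => h e.symm)
      rw [List.count_eq_zero]
      intro hc
      rcases List.mem_cons.mp hc with rfl | hcr
      · exact absurd rfl h
      · exact absurd (hp.1 c hcr) (not_le.mpr hcd)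

-- run-length scan of a sorted list succeeds iff every count is within bound
lemma igvRunsOk_true_iff (n : Nat) (s : List String) (hs : s.length ≤ n)
    (hp : s.Pairwise (· ≤ ·)) :
    igvRunsOk s = true ↔ ∀ c ∈ s, s.count c ≤ (if c = "Eu" then 2 else 1) := by
  induction n generalizing s with
  | zero =>
    rw [Nat.le_zero, List.length_eq_zero_iff] at hs
    subst hs; simp [igvRunsOk]
  | succ n ih =>
    cases s with
    | nil => simp [igvRunsOk]
    | cons head rest =>
      rw [List.pairwise_cons] at hp
      have htdw := List.takeWhile_append_dropWhile (p := (· == head)) (l := rest)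
      have htake : ∀ x ∈ rest.takeWhile (· == head), x = head := fun x hx => by
        simpa using List.mem_takeWhile_imp hx
      have hdw0 : (rest.dropWhile (· == head)).count head = 0 :=
        count_dropWhile_eq_zero head rest (fun x hx => hp.1 x hx) hp.2
      have h1 : (rest.takeWhile (· == head)).count head
          = (rest.takeWhile (· == head)).length :=
        List.count_eq_length.mpr (fun x hx => (htake x hx).symm)
      have hcount : (head :: rest).count head
          = 1 + (rest.takeWhile (· == head)).length := by
        have hc := congrArg (List.count head) htdw
        rw [List.count_append, h1, hdw0] at hc
        rw [List.count_cons_self]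
        omega
      have hother : ∀ c, c ≠ head →
          (head :: rest).count c = (rest.dropWhile (· == head)).count c := by
        intro c hc
        have hc2 := congrArg (List.count c) htdw
        rw [List.count_append,
          List.count_eq_zero.mpr (fun hm => hc (htake c hm))] at hc2
        rw [List.count_cons_of_ne (Ne.symm hc)]
        omega
      have hbound : (if head == "Eu" then 2 else 1)
          = (if head = "Eu" then 2 else 1 : Nat) := by
        by_cases he : head = "Eu" <;> simp [he]
      simp only [igvRunsOk, igvRun_eq]
      rw [hbound]
      by_cases hgt : 1 + (rest.takeWhile (· == head)).length
          > (if head = "Eu" then 2 else 1 : Nat)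
      · rw [if_pos hgt]
        simp only [Bool.false_eq_true, false_iff]
        intro hall
        have hh := hall head (by simp)
        rw [hcount] at hh
        omega
      · rw [if_neg hgt]
        have hlen : (rest.dropWhile (· == head)).length ≤ n :=
          le_trans (List.Sublist.length_le (List.dropWhile_sublist _))
            (by simpa using hs)
        have hpw2 : (rest.dropWhile (· == head)).Pairwise (· ≤ ·) :=
          List.Pairwise.sublist (List.dropWhile_sublist _) hp.2
        rw [ih _ hlen hpw2]
        constructor
        · intro hall c hc
          by_cases hch : c = head
          · subst hch
            rw [hcount]
            omega
          · rcases List.mem_cons.mp hc with rfl | hcr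
            · exact absurd rfl hch
            · by_cases hcp : c ∈ rest.dropWhile (· == head)
              · rw [hother c hch]; exact hall c hcp
              · have hsplit : c ∈ rest.takeWhile (· == head)
                    ∨ c ∈ rest.dropWhile (· == head) := by
                  rw [← List.mem_append, htdw]; exact hcr
                rcases hsplit with hm | hm
                · exact absurd (htake c hm) hch
                · exact absurd hm hcp
        · intro hall c hc
          have hch : c ≠ head := by
            intro e; subst e
            exact absurd hc (List.count_eq_zero.mp hdw0)
          rw [← hother c hch]
          exact hall c (List.mem_cons_of_mem head
            ((List.dropWhile_sublist _).subset hc))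

-- ===== VERDICT (by name: the statement is the Claim_ definition above) =====
theorem is_group_valid2_spec : Claim_equal_is_group_valid2 := by
  intro continents _
  unfold Spec_is_group_valid2 is_group_valid2_alt
  rw [Bool.eq_iff_iff, is_group_valid2_true_iff]
  have hperm : (PySem.List.sorted continents (fun x => x) false).Perm continents :=
    PySem.List.sorted_perm continents (fun x => x) false
  rw [igvRunsOk_true_iff _ _ le_rfl
    (by simpa using PySem.List.sorted_pairwise continents (fun x => x))]
  constructor
  · intro hall c hc
    rw [hperm.count_eq]
    exact hall c (hperm.mem_iff.mp hc)
  · intro hall c hc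
    rw [← hperm.count_eq]
    exact hall c (hperm.mem_iff.mpr hc)
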